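-- pv_equiv track=rewrite | github.com/evennia/evennia | evennia/contrib/utils/tree_select/tree_select.py | go_up_one_category
-- ===== SOURCE A (Python) =====
-- def dashcount(entry):
--     """
--     Counts the number of dashes at the beginning of a string. This
--     is needed to determine the depth of options in categories.
--
--     Args:
--         entry (str): String to count the dashes at the start of
--
--     Returns:
--         dashes (int): Number of dashes at the start
--     """
--     dashes = 0
--     for char in entry:
--         if char == "-":
--             dashes += 1
--         else:
--             return dashes
--     return dashes
--
-- def go_up_one_category(treestr, index):
--     """
--     Given a menu tree string and an index, returns the category that the given option
--     belongs to. Used for the 'go back' option.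
--
--     Args:
--         treestr (str): Multi-line string representing menu options
--         index (int): Index to determine the parent category of
--
--     Returns:
--         parent_category (int): Index of parent category
--     """
--     opt_list = treestr.split("\n")
--     # Get the number of dashes deep the given index is
--     dash_level = dashcount(opt_list[index])
--     # Delete everything after the current index
--     opt_list = opt_list[: index + 1]
--
--     # If there's no dash, return 'None' to return to base menu
--     if dash_level == 0:
--         return None
--     current_index = index
--     # Go up through each option until we find one that's one category above
--     for selection in reversed(opt_list):
--         if dashcount(selection) == dash_level - 1:
--             return current_index
--         current_index -= 1
-- ===== SOURCE B (Python) =====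
-- def go_up_one_category(treestr, index):
--     """Return the index of the parent category (one dash level up) of the
--     option at `index` in the menu tree string, or None if it is top-level.
--
--     Single forward pass: walk the lines up to and including `index`, keep a
--     table mapping each dash depth to the latest line index seen at that depth,
--     then look up the depth one above the queried line.
--     """
--     lines = treestr.split("\n")
--     depth = _leading_dashes(lines[index])
--     if depth == 0:
--         return None
--     last_at = {}
--     for i, line in enumerate(lines[: index + 1]):
--         last_at[_leading_dashes(line)] = i
--     return last_at.get(depth - 1)
--
-- def _leading_dashes(line):
--     n = 0
--     while n < len(line) and line[n] == "-":
--         n += 1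
--     return n
-- ===== Notes on version B (the rewrite author's own statement) =====
-- stated objective: alternative
-- what changed: Replaces the backward early-exit scan with a decrementing counter by one forward pass over the prefix that builds a dash-depth -> latest-line-index table and a single dict lookup of depth-1.
-- intended difference: For negative in-range index where the option has a parent, A's decrementing counter starts at the negative index and returns a negative index shifted by the line count (e.g. -3), while B returns the actual 0-based index of the parent line, which is the intended 'index of parent category'. — e.g. on go_up_one_category("a\n-b\n-c", -2): A returns some (-3), B returns some 0
import Mathlib
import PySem

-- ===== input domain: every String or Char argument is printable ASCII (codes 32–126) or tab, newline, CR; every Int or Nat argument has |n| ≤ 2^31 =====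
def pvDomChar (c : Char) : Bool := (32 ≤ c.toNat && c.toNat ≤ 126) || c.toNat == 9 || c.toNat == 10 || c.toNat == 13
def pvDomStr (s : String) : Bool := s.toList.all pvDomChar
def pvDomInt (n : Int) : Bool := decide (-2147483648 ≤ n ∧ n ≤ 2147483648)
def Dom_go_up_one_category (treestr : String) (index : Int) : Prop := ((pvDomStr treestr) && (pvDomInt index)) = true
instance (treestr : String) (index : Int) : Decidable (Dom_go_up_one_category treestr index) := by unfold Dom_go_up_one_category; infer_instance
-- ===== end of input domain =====

-- B replaces A's backward early-exit scan by one forward pass building a dash-depth → latest-line-index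
-- table plus a single lookup; same cost, different traversal; on negative in-range indices with a parent
-- B returns the parent's actual 0-based index where A returns a shifted negative one (see D_ below).

-- ===== PORT A =====
-- dashcount: count leading '-' characters, accumulating through the for loop
def dashcountA : List Char → Int
  | [] => 0
  | c :: rest => if c = '-' then dashcountA rest + 1 else 0

-- the backward `for selection in reversed(opt_list)` loop with current_index
def loopA : List String → Int → Int → Option Int
  | [], _, _ => none
  | s :: rest, ci, dl =>
      if dashcountA s.toList = dl - 1 then some ci else loopA rest (ci - 1) dl

def go_up_one_category (treestr : String) (index : Int) : Option Int :=
  let opt_list := (PySem.Str.split? treestr "\n").getD []   -- sep "\n" ≠ "": split? is always `some`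
  match PySem.List.pyGet? opt_list index with
  | none => none   -- IndexError: excluded by Pre_
  | some entry =>
    let dash_level := dashcountA entry.toList
    let opt_list2 := PySem.List.slice opt_list none (some (index + 1))
    if dash_level = 0 then none
    else loopA opt_list2.reverse index dash_level

-- ===== PORT B =====
-- _leading_dashes: the while loop counts the leading run of '-'
def leadB (cs : List Char) : Int := ((cs.takeWhile (fun c => c = '-')).length : Int)

-- the forward `for i, line in enumerate(lines[: index + 1])` pass building last_at
def buildTableB (start : Int) (lines : List String) : PySem.Dict Int Int :=
  (PySem.List.enumerate lines start).foldl (fun d p => d.insert (leadB p.2.toList) p.1) PySem.Dict.empty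

def go_up_one_category_alt (treestr : String) (index : Int) : Option Int :=
  let lines := (PySem.Str.split? treestr "\n").getD []
  match PySem.List.pyGet? lines index with
  | none => none   -- IndexError: excluded by Pre_
  | some line =>
    let depth := leadB line.toList
    if depth = 0 then none
    else
      (buildTableB 0 (PySem.List.slice lines none (some (index + 1)))).get? (depth - 1)

-- ===== PRECONDITION & SPEC =====
-- Pre_ excludes exactly the out-of-range indices, on which Python's lines[index] raises IndexError
-- (in both A and B); in-range indices, including negative ones, are admitted.
def Pre_go_up_one_category (treestr : String) (index : Int) : Prop :=
  -(((PySem.Str.split? treestr "\n").getD []).length : Int) ≤ index ∧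
    index < (((PySem.Str.split? treestr "\n").getD []).length : Int)
instance (treestr : String) (index : Int) : Decidable (Pre_go_up_one_category treestr index) := by
  unfold Pre_go_up_one_category; infer_instance

def pvWitness_go_up_one_category : String × Int := ("a\n-b\n--c", 2)

-- On negative in-range indices whose line is dashed and has a parent line in the prefix, A returns the
-- parent position shifted by its negative starting counter (e.g. -3) while B returns the parent's actual
-- 0-based line index, which is the intended 'index of parent category'.
def D_go_up_one_category (treestr : String) (index : Int) : Prop :=
  let L := (PySem.Str.split? treestr "\n").getD []
  let k := ((L.length : Int) + index).toNat
  index < -1 ∧ ∃ j ≤ k, dashcountA (L.getD j "").toList + 1 = dashcountA (L.getD k "").toList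
instance (treestr : String) (index : Int) : Decidable (D_go_up_one_category treestr index) := by
  unfold D_go_up_one_category; infer_instance

def Spec_go_up_one_category (treestr : String) (index : Int) (out : Option Int) : Prop :=
  ¬ D_go_up_one_category treestr index → out = go_up_one_category_alt treestr index
instance (treestr : String) (index : Int) (out : Option Int) : Decidable (Spec_go_up_one_category treestr index out) := by unfold Spec_go_up_one_category; infer_instance

def pvDiffWitness_go_up_one_category : String × Int := ("a\n-b\n-c", -2)
def pvDiffWitnessOut_go_up_one_category : (Option Int) × (Option Int) := (some (-3), some 0)

-- ===== CLAIM (what is proved, stated in full; the proofs are below) =====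
def Claim_unchanged_go_up_one_category : Prop := ∀ (treestr : String) (index : Int), Dom_go_up_one_category treestr index → Pre_go_up_one_category treestr index → Spec_go_up_one_category treestr index (go_up_one_category treestr index)
def Claim_changed_go_up_one_category : Prop := Dom_go_up_one_category (pvDiffWitness_go_up_one_category.1) (pvDiffWitness_go_up_one_category.2) ∧ Pre_go_up_one_category (pvDiffWitness_go_up_one_category.1) (pvDiffWitness_go_up_one_category.2) ∧ D_go_up_one_category (pvDiffWitness_go_up_one_category.1) (pvDiffWitness_go_up_one_category.2) ∧ go_up_one_category (pvDiffWitness_go_up_one_category.1) (pvDiffWitness_go_up_one_category.2) = pvDiffWitnessOut_go_up_one_category.1 ∧ go_up_one_category_alt (pvDiffWitness_go_up_one_category.1) (pvDiffWitness_go_up_one_category.2) = pvDiffWitnessOut_go_up_one_category.2 ∧ pvDiffWitnessOut_go_up_one_category.1 ≠ pvDiffWitnessOut_go_up_one_category.2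
def Claim_exact_go_up_one_category : Prop := ∀ (treestr : String) (index : Int), Dom_go_up_one_category treestr index → Pre_go_up_one_category treestr index → D_go_up_one_category treestr index → go_up_one_category treestr index ≠ go_up_one_category_alt treestr index

-- ===== LEMMAS AND PROOFS =====

lemma dashcountA_eq_leadB (cs : List Char) : dashcountA cs = leadB cs := by
  induction cs with
  | nil => rfl
  | cons c rest ih =>
      simp only [dashcountA, leadB, List.takeWhile]
      by_cases h : c = '-' <;> simp [h, ih, leadB]

lemma buildTableB_append (s : Int) (M : List String) (x : String) :
    buildTableB s (M ++ [x]) = (buildTableB s M).insert (leadB x.toList) (s + M.length) := by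
  simp [buildTableB, PySem.List.enumerate_append, PySem.List.enumerate, List.foldl_append]

-- A's backward scan equals a lookup in the table built with starting number ci - |L| + 1
lemma loopA_eq_table (L : List String) (ci dl : Int) :
    loopA L.reverse ci dl = (buildTableB (ci - L.length + 1) L).get? (dl - 1) := by
  induction L using List.reverseRecOn generalizing ci with
  | nil => simp [loopA, buildTableB, PySem.List.enumerate]
  | append_singleton M x ih =>
      rw [buildTableB_append, PySem.Dict.get?_insert]
      have hstart : ci - ((M ++ [x]).length : Int) + 1 + (M.length : Int) = ci := by
        simp; ring
      rw [hstart]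
      have hrev : (M ++ [x]).reverse = x :: M.reverse := by simp
      rw [hrev]
      simp only [loopA, dashcountA_eq_leadB]
      by_cases h : leadB x.toList = dl - 1
      · simp [h]
      · have h' : ¬ dl - 1 = leadB x.toList := fun hc => h hc.symm
        simp only [if_neg h, if_neg h']
        rw [ih (ci - 1)]
        have : ci - 1 - (M.length : Int) + 1 = ci - ((M ++ [x]).length : Int) + 1 := by
          simp; ring
        rw [this]

-- shifting the starting number shifts every stored value
lemma table_shift (s : Int) (L : List String) (k : Int) :
    (buildTableB s L).get? k = ((buildTableB 0 L).get? k).map (· + s) := by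
  induction L using List.reverseRecOn with
  | nil => simp [buildTableB, PySem.List.enumerate]
  | append_singleton M x ih =>
      rw [buildTableB_append, buildTableB_append, PySem.Dict.get?_insert, PySem.Dict.get?_insert]
      by_cases h : k = leadB x.toList
      · simp [h]; ring
      · simp [h, ih]

-- the lookup misses exactly when no line of L sits at depth k
lemma table_none_iff (L : List String) (k : Int) :
    (buildTableB 0 L).get? k = none ↔ ∀ l ∈ L, leadB l.toList ≠ k := by
  induction L using List.reverseRecOn with
  | nil => simp [buildTableB, PySem.List.enumerate]
  | append_singleton M x ih =>
      rw [buildTableB_append, PySem.Dict.get?_insert]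
      by_cases h : k = leadB x.toList
      · simp [h]
        exact ⟨x, by simp, rfl⟩
      · simp only [if_neg h, ih]
        constructor
        · intro hall l hl
          rcases List.mem_append.mp hl with hl | hl
          · exact hall l hl
          · simp at hl
            subst hl
            exact fun hc => h hc.symm
        · intro hall l hl
          exact hall l (List.mem_append.mpr (Or.inl hl))

-- Pre_ guarantees lines[index] returns: in-range lookup
lemma main_eq (treestr : String) (index : Int)
    (hPre : Pre_go_up_one_category treestr index) :
    ∃ entry, PySem.List.pyGet? ((PySem.Str.split? treestr "\n").getD []) index = some entry := by
  obtain ⟨hlo, hhi⟩ := hPre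
  cases h : PySem.List.pyGet? ((PySem.Str.split? treestr "\n").getD []) index with
  | some e => exact ⟨e, rfl⟩
  | none =>
      exfalso
      rw [PySem.List.pyGet?_eq_none_iff] at h
      simp [PySem.Raise.InRange] at h
      omega

-- Python's negative indexing, written with getD
lemma pyGet?_neg {α : Type} (xs : List α) (d : α) (i : Int)
    (h1 : -(xs.length : Int) ≤ i) (h2 : i < 0) :
    PySem.List.pyGet? xs i = some (xs.getD (((xs.length : Int) + i).toNat) d) := by
  have hk : ((xs.length : Int) + i).toNat < xs.length := by omega
  have hkk : xs.length - (-i).toNat = ((xs.length : Int) + i).toNat := by omega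
  simp [PySem.List.pyGet?, PySem.List.pyIdx?, if_neg (by omega : ¬ (0:Int) ≤ i), if_pos h1, hkk,
        List.getElem?_eq_getElem hk, List.getD_eq_getElem]

lemma leadB_nonneg (cs : List Char) : 0 ≤ leadB cs := by
  unfold leadB; exact Int.natCast_nonneg _

-- the slice lines[: index + 1] for index < -1: a take of the first length + index + 1 lines
lemma slice_neg_take (lines : List String) (index : Int) (h : index < -1) :
    PySem.List.slice lines none (some (index + 1))
      = lines.take (((lines.length : Int) + index + 1).toNat) := by
  have hkpos : 0 < (-(index + 1)).toNat := by omega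
  have hsome : (index + 1) = -(((-(index + 1)).toNat : Int)) := by omega
  rw [hsome, PySem.List.slice_to_neg_natCast lines ((-(index + 1)).toNat) hkpos]
  congr 1
  omega

-- ===== VERDICT (by name: the statement is the Claim_ definition above) =====
theorem go_up_one_category_spec : Claim_unchanged_go_up_one_category := by
  intro treestr index _ hPre hnD
  obtain ⟨entry, he⟩ := main_eq treestr index hPre
  obtain ⟨hlo, hhi⟩ := hPre
  unfold go_up_one_category go_up_one_category_alt
  simp only [he, dashcountA_eq_leadB]
  by_cases hz : leadB entry.toList = 0
  · simp [hz]
  · simp only [if_neg hz]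
    set lines := (PySem.Str.split? treestr "\n").getD [] with hlines
    rw [loopA_eq_table, table_shift]
    by_cases hneg : 0 ≤ index
    · -- non-negative index: the prefix has exactly index + 1 lines, so the shift is zero
      have hp : ((PySem.List.slice lines none (some (index + 1))).length : Int) = index + 1 := by
        rw [PySem.List.slice_to lines (by omega : (0:Int) ≤ index + 1)]
        have h1 : ((index + 1).toNat : Int) = index + 1 := by omega
        have h2 : (index + 1).toNat ≤ lines.length := by omega
        simp [List.length_take, Nat.min_eq_left h2, h1]
      rw [hp, (by ring : index - (index + 1) + 1 = 0)]
      cases (buildTableB 0 (PySem.List.slice lines none (some (index + 1)))).get? (leadB entry.toList - 1) <;> simp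
    · by_cases him1 : index = -1
      · -- index = -1: the prefix is empty, both lookups miss
        subst him1
        have h0 : PySem.List.slice lines none (some (-1 + 1)) = ([] : List String) := by
          rw [(by norm_num : (-1 : Int) + 1 = 0), PySem.List.slice_to lines (by norm_num)]
          simp
        rw [h0]
        have : (buildTableB 0 ([] : List String)).get? (leadB entry.toList - 1) = none := by
          rw [table_none_iff]; simp
        rw [this]
        rfl
      · -- index < -1 outside D_: no parent line in the prefix, both lookups miss
        have hkN : PySem.List.pyGet? lines index
            = some (lines.getD (((lines.length : Int) + index).toNat) "") :=
          pyGet?_neg lines "" index hlo (by omega)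
        have hentry : entry = lines.getD (((lines.length : Int) + index).toNat) "" := by
          rw [he] at hkN; exact Option.some.inj hkN
        have hnone : (buildTableB 0 (PySem.List.slice lines none (some (index + 1)))).get?
            (leadB entry.toList - 1) = none := by
          rw [table_none_iff]
          intro l hl hc
          rw [slice_neg_take lines index (by omega)] at hl
          obtain ⟨j, hj, hlj⟩ := List.mem_take_iff_getElem.mp hl
          apply hnD
          unfold D_go_up_one_category
          rw [← hlines]
          refine ⟨by omega, ⟨j, by omega, ?_⟩⟩
          have hjn : j < lines.length := by omega
          rw [List.getD_eq_getElem lines "" hjn, hlj, ← hentry]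
          rw [dashcountA_eq_leadB, dashcountA_eq_leadB, hc]
          ring
        rw [hnone]
        rfl

theorem go_up_one_category_changed : Claim_changed_go_up_one_category := by
  unfold Claim_changed_go_up_one_category; decide

theorem go_up_one_category_tight : Claim_exact_go_up_one_category := by
  intro treestr index _ hPre hD
  obtain ⟨entry, he⟩ := main_eq treestr index hPre
  obtain ⟨hlo, hhi⟩ := hPre
  unfold D_go_up_one_category at hD
  obtain ⟨him1, j, hjle, hjd⟩ := hD
  unfold go_up_one_category go_up_one_category_alt
  simp only [he, dashcountA_eq_leadB]
  set lines := (PySem.Str.split? treestr "\n").getD [] with hlines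
  have hkN : PySem.List.pyGet? lines index
      = some (lines.getD (((lines.length : Int) + index).toNat) "") :=
    pyGet?_neg lines "" index hlo (by omega)
  have hentry : entry = lines.getD (((lines.length : Int) + index).toNat) "" := by
    rw [he] at hkN; exact Option.some.inj hkN
  rw [dashcountA_eq_leadB, dashcountA_eq_leadB, ← hentry] at hjd
  have hz : ¬ leadB entry.toList = 0 := by
    have := leadB_nonneg (lines.getD j "").toList
    omega
  simp only [if_neg hz]
  rw [loopA_eq_table, table_shift]
  have hjn : j < lines.length := by omega
  -- the base lookup hits: line j is a prefix line at the parent depth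
  have hsome : (buildTableB 0 (PySem.List.slice lines none (some (index + 1)))).get?
      (leadB entry.toList - 1) ≠ none := by
    intro hn
    rw [table_none_iff] at hn
    apply hn (lines.getD j "")
    · rw [slice_neg_take lines index (by omega)]
      apply List.mem_take_iff_getElem.mpr
      exact ⟨j, by omega, (List.getD_eq_getElem lines "" hjn).symm⟩
    · omega
  obtain ⟨v, hv⟩ := Option.ne_none_iff_exists'.mp hsome
  rw [hv]
  -- the shift is negative: the prefix is nonempty and index + 1 ≤ 0
  have hplen : 1 ≤ ((PySem.List.slice lines none (some (index + 1))).length : Int) := by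
    rw [slice_neg_take lines index (by omega)]
    have : 0 < (((lines.length : Int) + index + 1).toNat) := by omega
    have h2 : 0 < lines.length := by omega
    simp [List.length_take]
    omega
  simp only [Option.map_some]
  intro hc
  have := Option.some.inj hc
  omega
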